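-- pv_equiv track=rewrite | github.com/arbarak/erp_marocaine | backend/config/data_protection.py | anonymize_address
-- ===== SOURCE A (Python) =====
-- def anonymize_address(address: str) -> str:
--     """Anonymize address"""
--     if not address:
--         return address
--
--     # Keep only city/region information, anonymize street details
--     lines = address.split('\n')
--     anonymized_lines = []
--
--     for i, line in enumerate(lines):
--         if i == 0:  # First line (street address)
--             anonymized_lines.append('[STREET ADDRESS REDACTED]')
--         else:  # Keep city, state, postal code
--             anonymized_lines.append(line)
--
--     return '\n'.join(anonymized_lines)
-- ===== SOURCE B (Python) =====
-- def anonymize_address(address: str) -> str: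
--     """Anonymize address"""
--     if not address:
--         return address
--     idx = address.find('\n')
--     if idx == -1:
--         return '[STREET ADDRESS REDACTED]'
--     return '[STREET ADDRESS REDACTED]' + address[idx:]
-- ===== Notes on version B (the rewrite author's own statement) =====
-- stated objective: simpler
-- what changed: Replaces the split-into-lines list, the enumerate loop and the join by a single find of the first newline and one slice: the redaction constant is concatenated with the text from that newline on, so no list of lines is ever built.
import Mathlib
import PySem

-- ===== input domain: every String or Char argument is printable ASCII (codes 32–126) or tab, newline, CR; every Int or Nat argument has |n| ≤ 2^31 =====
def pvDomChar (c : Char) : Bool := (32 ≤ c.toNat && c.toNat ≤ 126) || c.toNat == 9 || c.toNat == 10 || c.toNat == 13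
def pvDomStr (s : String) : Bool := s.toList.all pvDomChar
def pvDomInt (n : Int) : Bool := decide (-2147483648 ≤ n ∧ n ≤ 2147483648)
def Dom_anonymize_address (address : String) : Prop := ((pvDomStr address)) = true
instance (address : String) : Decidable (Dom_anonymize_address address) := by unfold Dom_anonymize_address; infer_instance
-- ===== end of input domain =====

-- B replaces A's split-into-lines list, enumerate loop and '\n'.join by one find('\n')
-- plus a slice from the first newline (objective: simpler).


-- ===== PORT A =====
def anonymize_address (address : String) : String :=
  if PySem.Str.len address = 0 then address    -- 'if not address'
  else
    -- lines = address.split('\n')  (sep ≠ "", always some)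
    -- anonymized_lines = the foldl below; '\n'.join(anonymized_lines)
    PySem.Str.join "\n"
      ((PySem.List.enumerate ((PySem.Str.split? address "\n").getD [])).foldl
        (fun acc (p : Int × String) =>
          if p.1 = 0 then acc ++ ["[STREET ADDRESS REDACTED]"]
          else acc ++ [p.2]) [])

-- ===== PORT B =====
def anonymize_address_alt (address : String) : String :=
  if PySem.Str.len address = 0 then address    -- 'if not address'
  else
    -- idx = address.find('\n')
    if PySem.Str.find address "\n" = -1 then "[STREET ADDRESS REDACTED]"
    else -- '+' on str ported as list append under ofList (exact)
      String.ofList ("[STREET ADDRESS REDACTED]".toList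
        ++ (PySem.Str.slice address (some (PySem.Str.find address "\n")) none).toList)

-- ===== PRECONDITION & SPEC =====
def Spec_anonymize_address (address : String) (out : String) : Prop := out = anonymize_address_alt address
instance (address : String) (out : String) : Decidable (Spec_anonymize_address address out) := by unfold Spec_anonymize_address; infer_instance

-- ===== CLAIM (what is proved, stated in full; the proofs are below) =====
def Claim_equal_anonymize_address : Prop := ∀ (address : String), Dom_anonymize_address address → Spec_anonymize_address address (anonymize_address address)

-- ===== LEMMAS AND PROOFS =====

-- spec version of splitting on a single '\n'
def pvSplitNl : List Char → List (List Char)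
  | [] => [[]]
  | c :: rest =>
    if c = '\n' then [] :: pvSplitNl rest
    else match pvSplitNl rest with
      | l :: ls => (c :: l) :: ls
      | [] => [[c]]

theorem pvSplitNl_ne_nil (cs : List Char) : pvSplitNl cs ≠ [] := by
  induction cs with
  | nil => simp [pvSplitNl]
  | cons c rest ih =>
    simp only [pvSplitNl]
    split_ifs
    · simp
    · cases h : pvSplitNl rest <;> simp

theorem pvSplitOn_go_eq (l : List Char) : ∀ (fuel : Nat) (cur : List Char)
    (acc : List (List Char)) (x : List Char) (xs : List (List Char)),
    l.length < fuel → pvSplitNl l = x :: xs →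
    PySem.Chars.splitOn.go ['\n'] fuel l cur acc = acc.reverse ++ (cur.reverse ++ x) :: xs := by
  induction l with
  | nil =>
    intro fuel cur acc x xs hf hs
    cases fuel with
    | zero => omega
    | succ fuel => simp [pvSplitNl] at hs; simp [PySem.Chars.splitOn.go, hs.1, ← hs.2]
  | cons c rest ih =>
    intro fuel cur acc x xs hf hs
    cases fuel with
    | zero => omega
    | succ fuel =>
      rw [PySem.Chars.splitOn.go]
      by_cases hc : c = '\n'
      · subst hc
        have hs' : ([] : List Char) :: pvSplitNl rest = x :: xs := by
          simpa [pvSplitNl] using hs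
        obtain ⟨y, ys, hr⟩ := List.exists_cons_of_ne_nil (pvSplitNl_ne_nil rest)
        have hx : x = [] := (List.cons.injEq _ _ _ _ ▸ hs').1.symm
        have hxs : xs = y :: ys := by
          have := (List.cons.injEq _ _ _ _ ▸ hs').2; rw [← this, hr]
        have hpre : (['\n'] : List Char).isPrefixOf ('\n' :: rest) = true := by simp
        rw [if_pos hpre]
        have := ih fuel [] (cur.reverse :: acc) y ys (by simp_all) hr
        simp only [List.length_cons, List.length_nil, List.drop_succ_cons, List.drop_zero]
        rw [this, hx, hxs]
        simp
      · have hpre : (['\n'] : List Char).isPrefixOf (c :: rest) = false := by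
          simp [List.isPrefixOf]; intro h; exact absurd h.symm hc
        rw [if_neg (by simp [hpre])]
        obtain ⟨y, ys, hr⟩ := List.exists_cons_of_ne_nil (pvSplitNl_ne_nil rest)
        have hsplit : pvSplitNl (c :: rest) = (c :: y) :: ys := by
          simp [pvSplitNl, hc, hr]
        rw [hsplit] at hs
        have hx : x = c :: y := (List.cons.injEq _ _ _ _ ▸ hs).1.symm
        have hxs : xs = ys := (List.cons.injEq _ _ _ _ ▸ hs).2.symm
        have := ih fuel (c :: cur) acc y ys (by simp_all) hr
        rw [this, hx, hxs]
        simp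

theorem pvSplitOn_nl (cs : List Char) : PySem.Chars.splitOn cs ['\n'] = pvSplitNl cs := by
  obtain ⟨x, xs, hx⟩ := List.exists_cons_of_ne_nil (pvSplitNl_ne_nil cs)
  rw [hx, PySem.Chars.splitOn, pvSplitOn_go_eq cs (cs.length + 1) [] [] x xs (by omega) hx]
  simp

theorem pvJoin_splitNl (t : List Char) : PySem.Chars.join ['\n'] (pvSplitNl t) = t := by
  induction t with
  | nil => simp [pvSplitNl, PySem.Chars.join_singleton]
  | cons c rest ih =>
    obtain ⟨y, ys, hr⟩ := List.exists_cons_of_ne_nil (pvSplitNl_ne_nil rest)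
    by_cases hc : c = '\n'
    · subst hc
      have h1 : pvSplitNl ('\n' :: rest) = [] :: y :: ys := by simp [pvSplitNl, hr]
      rw [h1, PySem.Chars.join_cons_cons, ← hr, ih]
      simp
    · have h1 : pvSplitNl (c :: rest) = (c :: y) :: ys := by simp [pvSplitNl, hc, hr]
      rw [h1]
      cases ys with
      | nil =>
        rw [PySem.Chars.join_singleton]
        have := ih; rw [hr, PySem.Chars.join_singleton] at this
        simp [this]
      | cons z zs =>
        rw [PySem.Chars.join_cons_cons]
        have := ih; rw [hr, PySem.Chars.join_cons_cons] at this
        rw [← this]; simp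

theorem pvSplitNl_no_nl (cs : List Char) (h : '\n' ∉ cs) : pvSplitNl cs = [cs] := by
  induction cs with
  | nil => simp [pvSplitNl]
  | cons c rest ih =>
    have hc : c ≠ '\n' := fun he => h (he ▸ List.mem_cons_self)
    have hrest : pvSplitNl rest = [rest] := ih (fun hm => h (List.mem_cons_of_mem _ hm))
    simp [pvSplitNl, hc, hrest]

theorem pvSplitNl_append (pre suf : List Char) (h : '\n' ∉ pre) :
    pvSplitNl (pre ++ '\n' :: suf) = pre :: pvSplitNl suf := by
  induction pre with
  | nil => simp [pvSplitNl]
  | cons c p ih =>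
    have hc : c ≠ '\n' := fun he => h (he ▸ List.mem_cons_self)
    have := ih (fun hm => h (List.mem_cons_of_mem _ hm))
    simp only [List.cons_append, pvSplitNl, if_neg hc, this]

-- A's loop: every element after the first is kept unchanged
theorem pvFold_tail (rest : List String) : ∀ (s : Int) (acc : List String), 1 ≤ s →
    (PySem.List.enumerate rest s).foldl
      (fun acc (p : Int × String) =>
        if p.1 = 0 then acc ++ ["[STREET ADDRESS REDACTED]"] else acc ++ [p.2]) acc
    = acc ++ rest := by
  induction rest with
  | nil => intro s acc _; simp [PySem.List.enumerate]
  | cons r rs ih =>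
    intro s acc hs
    rw [PySem.List.enumerate_cons, List.foldl_cons]
    have hne : ¬ (s = 0) := by omega
    simp only [hne, if_false]
    rw [ih (s + 1) (acc ++ [r]) (by omega)]
    simp

-- ===== VERDICT (by name: the statement is the Claim_ definition above) =====
theorem anonymize_address_spec : Claim_equal_anonymize_address := by
  intro address _
  unfold Spec_anonymize_address anonymize_address anonymize_address_alt
  by_cases h0 : PySem.Str.len address = 0
  · rw [if_pos h0, if_pos h0]
  rw [if_neg h0, if_neg h0]
  set cs := address.toList with hcs
  have hsplit : (PySem.Str.split? address "\n").getD []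
      = (pvSplitNl cs).map String.ofList := by
    rw [PySem.Str.split?]
    have : PySem.Chars.split? cs "\n".toList = some (pvSplitNl cs) := by
      rw [show "\n".toList = ['\n'] from rfl, PySem.Chars.split?]
      simp [pvSplitOn_nl]
    rw [this]; rfl
  rw [hsplit]
  have hfind : PySem.Str.find address "\n" = PySem.Chars.find cs ['\n'] := by
    rw [PySem.Str.find_eq, show "\n".toList = ['\n'] by decide]
  by_cases hmem : '\n' ∈ cs
  · -- a newline exists: find ≥ 0; split at the first occurrence
    have hinf : ['\n'] <:+: cs := (List.singleton_infix_iff _ _).mpr hmem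
    have hpos : 0 ≤ PySem.Chars.find cs ['\n'] :=
      (PySem.Chars.find_nonneg_iff cs ['\n']).mpr hinf
    obtain ⟨hpref, hmin⟩ := PySem.Chars.find_spec hpos
    set k := (PySem.Chars.find cs ['\n']).toNat with hk
    have hkne : ¬ (PySem.Chars.find cs ['\n'] = -1) := by omega
    rw [hfind, if_neg hkne]
    have hklt : k < cs.length := by
      rcases hpref with ⟨t, ht⟩
      have := congrArg List.length ht
      simp at this
      by_contra hle
      simp [List.drop_eq_nil_of_le (by omega : cs.length ≤ k)] at ht
    have hgk : cs[k] = '\n' := by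
      rcases hpref with ⟨t, ht⟩
      rw [← List.getElem_cons_drop hklt] at ht
      exact (List.cons_eq_cons.mp ht).1.symm
    have hdecomp : cs = cs.take k ++ '\n' :: cs.drop (k + 1) := by
      conv_lhs => rw [← List.take_append_drop k cs]
      rw [← List.getElem_cons_drop hklt, hgk]
    have hnotpre : '\n' ∉ cs.take k := by
      intro hm
      obtain ⟨i, hi, hie⟩ := List.getElem_of_mem hm
      have hik : i < k := by
        have := hi; simp [List.length_take] at this; omega
      apply hmin i hik
      have hilt : i < cs.length := by omega
      rw [List.getElem_take] at hie
      rw [← List.getElem_cons_drop hilt, hie]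
      exact ⟨cs.drop (i + 1), rfl⟩
    have hsp : pvSplitNl cs = cs.take k :: pvSplitNl (cs.drop (k + 1)) := by
      conv_lhs => rw [hdecomp]
      exact pvSplitNl_append _ _ hnotpre
    rw [hsp]
    obtain ⟨y, ys, hy⟩ := List.exists_cons_of_ne_nil (pvSplitNl_ne_nil (cs.drop (k + 1)))
    -- evaluate A's loop and join
    rw [List.map_cons, PySem.List.enumerate_cons, List.foldl_cons]
    simp only [if_true, List.nil_append, zero_add]
    rw [pvFold_tail _ 1 _ (by omega)]
    rw [PySem.Str.join]
    congr 1
    rw [List.singleton_append, show "\n".toList = ['\n'] by decide, List.map_cons, List.map_map]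
    have hmaps : List.map (String.toList ∘ String.ofList) (pvSplitNl (cs.drop (k + 1)))
        = pvSplitNl (cs.drop (k + 1)) := by
      simp [Function.comp_def]
    rw [hmaps, hy, PySem.Chars.join_cons_cons, ← hy, pvJoin_splitNl]
    rw [PySem.Str.toList_slice, PySem.Chars.slice_eq_listSlice,
      PySem.List.slice_from cs hpos, ← hk]
    conv_rhs => rw [← List.getElem_cons_drop hklt, hgk]
    simp
  · -- no newline: A redacts the single line, B returns the constant
    have hne : PySem.Chars.find cs ['\n'] = -1 :=
      (PySem.Chars.find_eq_neg_one_iff cs ['\n']).mpr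
        (fun hi => hmem ((List.singleton_infix_iff _ _).mp hi))
    rw [hfind, if_pos hne]
    rw [pvSplitNl_no_nl cs hmem]
    rw [List.map_cons, PySem.List.enumerate_cons, List.foldl_cons]
    simp only [if_true, List.nil_append, List.map_nil, PySem.List.enumerate, List.foldl_nil]
    rw [PySem.Str.join]
    rw [show List.map String.toList ["[STREET ADDRESS REDACTED]"]
      = [("[STREET ADDRESS REDACTED]" : String).toList] from rfl]
    rw [PySem.Chars.join_singleton]
    exact String.ofList_toList
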